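-- pv_equiv track=rewrite | github.com/NadavMizrachi/my-genetic-algo | main.py | max_holes_evaluation
-- ===== SOURCE A (Python) =====
-- def max_holes_evaluation(list_of_bits):
--     holes = 0
--     hole_started = list_of_bits[0] == 1
--     inside_hole = False
--     for i in range(1, len(list_of_bits)):
--         if list_of_bits[i] == 1:
--             if inside_hole:
--                 holes += 1
--                 inside_hole = False
--                 hole_started = True
--             else:
--                 hole_started = True
--         else:
--             if hole_started:
--                 inside_hole = True
--             # list_of_bits[i] is 0
--
--     return -1 * holes
-- ===== SOURCE B (Python) =====
-- def max_holes_evaluation(list_of_bits):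
--     ones = [i for i, b in enumerate(list_of_bits) if b == 1]
--     return -sum(1 for a, b in zip(ones, ones[1:]) if b - a > 1)
-- ===== Notes on version B (the rewrite author's own statement) =====
-- stated objective: simpler
-- what changed: Replaces A's three-variable state machine over indices with a two-pass: collect positions of 1-bits, then count adjacent position pairs with difference > 1.
import Mathlib
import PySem

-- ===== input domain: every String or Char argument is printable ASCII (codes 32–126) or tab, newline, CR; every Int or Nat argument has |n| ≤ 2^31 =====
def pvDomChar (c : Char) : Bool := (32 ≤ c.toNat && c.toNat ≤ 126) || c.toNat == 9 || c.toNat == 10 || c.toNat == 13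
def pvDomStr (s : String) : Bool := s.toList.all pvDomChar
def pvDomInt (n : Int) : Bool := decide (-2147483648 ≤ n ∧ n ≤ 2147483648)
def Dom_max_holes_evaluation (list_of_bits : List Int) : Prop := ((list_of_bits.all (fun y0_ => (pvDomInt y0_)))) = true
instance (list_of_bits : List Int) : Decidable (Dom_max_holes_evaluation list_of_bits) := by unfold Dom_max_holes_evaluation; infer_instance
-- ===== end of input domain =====

-- B replaces A's three-variable state machine with a two-pass over 1-bit positions (objective: simpler); on the empty list A raises IndexError (excluded by Pre_) while B returns 0.

-- ===== PORT A =====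
-- A's loop body, named (helper for the port; branch structure exactly as in the Python)
def stepA : (Int × Bool × Bool) → Int → (Int × Bool × Bool) :=
  fun st b =>
    let (holes, hole_started, inside_hole) := st
    if b == 1 then
      if inside_hole then (holes + 1, true, false)
      else (holes, true, inside_hole)
    else
      if hole_started then (holes, hole_started, true)
      else (holes, hole_started, inside_hole)

def max_holes_evaluation (list_of_bits : List Int) : Int :=
  let holes : Int := 0
  let hole_started : Bool := PySem.List.pyGetD list_of_bits 0 0 == 1
  let inside_hole : Bool := false
  let st :=
    (PySem.List.pyRange 1 list_of_bits.length 1).foldl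
      (fun st i => stepA st (PySem.List.pyGetD list_of_bits i 0))
      (holes, hole_started, inside_hole)
  let res : Int := -1 * st.1
  res

-- ===== PORT B =====
def max_holes_evaluation_alt (list_of_bits : List Int) : Int :=
  let ones : List Int :=
    ((PySem.List.enumerate list_of_bits 0).filter (fun p => p.2 == 1)).map (fun p => p.1)
  let res : Int := -(((ones.zip ones.tail).filter (fun p => p.2 - p.1 > 1)).length : Int)
  res

-- ===== PRECONDITION & SPEC =====
-- A indexes the first element unconditionally, so it raises IndexError on the empty list; Pre_ excludes exactly that.
def Pre_max_holes_evaluation (list_of_bits : List Int) : Prop := list_of_bits ≠ []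
instance (list_of_bits : List Int) : Decidable (Pre_max_holes_evaluation list_of_bits) := by unfold Pre_max_holes_evaluation; infer_instance
def pvWitness_max_holes_evaluation : List Int := [1, 0, 1, 0, 0, 1]

def Spec_max_holes_evaluation (list_of_bits : List Int) (out : Int) : Prop := out = max_holes_evaluation_alt list_of_bits
instance (list_of_bits : List Int) (out : Int) : Decidable (Spec_max_holes_evaluation list_of_bits out) := by unfold Spec_max_holes_evaluation; infer_instance

-- ===== CLAIM (what is proved, stated in full; the proofs are below) =====
def Claim_equal_max_holes_evaluation : Prop := ∀ (list_of_bits : List Int), Dom_max_holes_evaluation list_of_bits → Pre_max_holes_evaluation list_of_bits → Spec_max_holes_evaluation list_of_bits (max_holes_evaluation list_of_bits)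

-- ===== LEMMAS AND PROOFS =====

-- has1 t: t contains a 1
def has1 (t : List Int) : Bool := t.any (· == 1)

-- eB t = 1 iff t's first 1 (if any) is preceded by a non-1 entry
def eB : List Int → Int
  | [] => 0
  | b :: r => if b == 1 then 0 else if has1 r then 1 else 0

-- gB t = number of holes (adjacent 1-positions at distance > 1) in t
def gB : List Int → Int
  | [] => 0
  | b :: r => if b == 1 then gB r + eB r else gB r

lemma foldA_char : ∀ (t : List Int) (h : Int),
    (t.foldl stepA (h, false, false)).1 = h + gB t ∧
    (t.foldl stepA (h, true, false)).1 = h + gB t + eB t ∧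
    (t.foldl stepA (h, true, true)).1 = h + gB t + (if has1 t then 1 else 0) := by
  intro t
  induction t with
  | nil => intro h; simp [gB, eB, has1]
  | cons b r ih =>
    intro h
    by_cases hb : b = 1
    · subst hb
      have s1 : stepA (h, false, false) 1 = (h, true, false) := by simp [stepA]
      have s2 : stepA (h, true, false) 1 = (h, true, false) := by simp [stepA]
      have s3 : stepA (h, true, true) 1 = (h + 1, true, false) := by simp [stepA]
      have g0 : gB (1 :: r) = gB r + eB r := by simp [gB]
      have e0 : eB (1 :: r) = 0 := by simp [eB]
      have h0 : has1 (1 :: r) = true := by simp [has1]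
      refine ⟨?_, ?_, ?_⟩
      · rw [List.foldl_cons, s1, (ih h).2.1, g0]; omega
      · rw [List.foldl_cons, s2, (ih h).2.1, g0, e0]; omega
      · rw [List.foldl_cons, s3, (ih (h + 1)).2.1, g0, h0]; simp only [if_true]; omega
    · have hb' : (b == 1) = false := by simp [hb]
      have s1 : stepA (h, false, false) b = (h, false, false) := by simp [stepA, hb']
      have s2 : stepA (h, true, false) b = (h, true, true) := by simp [stepA, hb']
      have s3 : stepA (h, true, true) b = (h, true, true) := by simp [stepA, hb']
      have g1 : gB (b :: r) = gB r := by simp [gB, hb']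
      have e1 : eB (b :: r) = if has1 r then 1 else 0 := by simp [eB, hb']
      have h1 : has1 (b :: r) = has1 r := by simp [has1, hb]
      refine ⟨?_, ?_, ?_⟩
      · rw [List.foldl_cons, s1, (ih h).1, g1]
      · rw [List.foldl_cons, s2, (ih h).2.2, g1, e1]
      · rw [List.foldl_cons, s3, (ih h).2.2, g1, h1]

-- B-side helpers: positions of 1-bits from start index s
def onesL (s : Int) (t : List Int) : List Int :=
  ((PySem.List.enumerate t s).filter (fun p => p.2 == 1)).map (fun p => p.1)

def pc (xs : List Int) : Int :=
  ((xs.zip xs.tail).filter (fun p => p.2 - p.1 > 1)).length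

lemma onesL_cons (s : Int) (b : Int) (r : List Int) :
    onesL s (b :: r) = if b == 1 then s :: onesL (s + 1) r else onesL (s + 1) r := by
  by_cases hb : b = 1 <;> simp [onesL, PySem.List.enumerate_cons, hb]

lemma onesL_nil_iff : ∀ (t : List Int) (s : Int), onesL s t = [] ↔ has1 t = false := by
  intro t
  induction t with
  | nil => intro s; simp [onesL, has1, PySem.List.enumerate_nil]
  | cons b r ih =>
    intro s
    by_cases hb : b = 1 <;> simp [onesL_cons, hb, has1, ih (s + 1)]

lemma onesL_mem_le : ∀ (t : List Int) (s x : Int), x ∈ onesL s t → s ≤ x := by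
  intro t
  induction t with
  | nil => intro s x hx; simp [onesL, PySem.List.enumerate_nil] at hx
  | cons b r ih =>
    intro s x hx
    rw [onesL_cons] at hx
    by_cases hb : b = 1
    · simp [hb] at hx
      rcases hx with rfl | hx
      · omega
      · have := ih (s + 1) x hx; omega
    · simp [hb] at hx
      have := ih (s + 1) x hx; omega

lemma pc_cons_cons (x y : Int) (zs : List Int) :
    pc (x :: y :: zs) = (if y - x > 1 then 1 else 0) + pc (y :: zs) := by
  by_cases h : y - x > 1
  · simp [pc, h]; omega
  · simp [pc, h]

lemma pc_one_cons : ∀ (r : List Int) (s : Int), pc (s :: onesL (s + 1) r) = eB r + pc (onesL (s + 1) r) := by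
  intro r
  induction r with
  | nil => intro s; simp [onesL, PySem.List.enumerate_nil, pc, eB]
  | cons c q ih =>
    intro s
    by_cases hc : c = 1
    · rw [onesL_cons]
      simp only [hc, beq_self_eq_true, if_true]
      rw [pc_cons_cons]
      simp [eB]
    · rw [onesL_cons]
      have hc' : (c == 1) = false := by simp [hc]
      simp only [hc', Bool.false_eq_true, if_false]
      rcases hq : onesL (s + 1 + 1) q with _ | ⟨y, zs⟩
      · have : has1 q = false := (onesL_nil_iff q (s + 1 + 1)).1 hq
        simp [pc, eB, this]
      · have hy : s + 1 + 1 ≤ y := onesL_mem_le q (s + 1 + 1) y (by rw [hq]; simp)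
        have hq1 : has1 q = true := by
          by_contra h
          have := (onesL_nil_iff q (s + 1 + 1)).2 (by simpa using h)
          rw [hq] at this; simp at this
        rw [pc_cons_cons]
        have : y - s > 1 := by omega
        simp [eB, hc', hq1, this]

lemma pc_onesL : ∀ (t : List Int) (s : Int), pc (onesL s t) = gB t := by
  intro t
  induction t with
  | nil => intro s; simp [onesL, PySem.List.enumerate_nil, pc, gB]
  | cons b r ih =>
    intro s
    rw [onesL_cons]
    by_cases hb : b = 1
    · simp only [hb, beq_self_eq_true, if_true]
      rw [pc_one_cons, ih (s + 1)]
      simp [gB]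
      omega
    · have hb' : (b == 1) = false := by simp [hb]
      simp only [hb', Bool.false_eq_true, if_false]
      rw [ih (s + 1)]
      simp [gB, hb']

lemma alt_eq_neg_gB (l : List Int) : max_holes_evaluation_alt l = -gB l := by
  have := pc_onesL l 0
  simp only [max_holes_evaluation_alt]
  rw [← this]
  simp [pc, onesL]

-- ===== VERDICT (by name: the statement is the Claim_ definition above) =====
theorem max_holes_evaluation_spec : Claim_equal_max_holes_evaluation := by
  intro l _ hpre
  rcases l with _ | ⟨b, t⟩
  · exact absurd rfl hpre
  · show max_holes_evaluation (b :: t) = max_holes_evaluation_alt (b :: t)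
    rw [alt_eq_neg_gB]
    simp only [max_holes_evaluation]
    rw [PySem.List.foldl_pyRange_pyGetD' (b :: t) 0 stepA
          (0, PySem.List.pyGetD (b :: t) 0 0 == 1, false) (by norm_num : (0:Int) ≤ 1)]
    simp only [Int.toNat_one, List.drop_one, List.tail_cons]
    have h0 : PySem.List.pyGetD (b :: t) 0 0 = b := by
      simp [PySem.List.pyGetD, PySem.List.pyGet?, PySem.List.pyIdx?]
    rw [h0]
    by_cases hb : b = 1
    · subst hb
      have hc := (foldA_char t 0).2.1
      have g0 : gB (1 :: t) = gB t + eB t := by simp [gB]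
      simp only [beq_self_eq_true]
      rw [hc, g0]
      omega
    · have hb' : (b == 1) = false := by simp [hb]
      have hc := (foldA_char t 0).1
      have g1 : gB (b :: t) = gB t := by simp [gB, hb']
      rw [hb', hc, g1]
      omega
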